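-- pv_equiv track=rewrite | github.com/DanielMartinAlarcon/lambdata | lambdata_danielmartinalarcon/coding_challenges/cipher.py | sub_cipher
-- ===== SOURCE A (Python) =====
-- def sub_cipher(str1, str2):
--     keys = list(str1)
--     values = list(str2)
--
--     cipher_dict = {}
--     cipher = False
--
--     if len(keys) != len(values):
--         return cipher
--
--     # For loop that returns cipher=False for all cases that break
--     # the acceptable pattern
--     for i in range(len(keys)):
--
--         # Has this key been used before?
--         if keys[i] in cipher_dict.keys():
--             # If it has been used, did it have a different value?
--             if cipher_dict[keys[i]] != values[i]:
--                 # If so, cipher is false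
--                 return cipher
--
--         # If the key has not been used before,
--         else:
--             # Has the value been assigned to a different key?
--             if values[i] in cipher_dict.values():
--                 # If so, cipher is false
--                 return cipher
--             # If not, assign value to key
--             cipher_dict[keys[i]] = values[i]
--
--     # If you got this far, it's a cipher
--     cipher = True
--     return cipher
-- ===== SOURCE B (Python) =====
-- def sub_cipher(str1, str2):
--     if len(str1) != len(str2):
--         return False
--     pairs = set(zip(str1, str2))
--     return len(pairs) == len(set(str1)) == len(set(str2))
-- ===== Notes on version B (the rewrite author's own statement) =====
-- stated objective: simpler
-- what changed: Replaces the incremental dict-building scan with early returns by one cardinality comparison: the pairing is a valid substitution cipher iff the number of distinct (key,value) pairs equals the number of distinct keys and also the number of distinct values.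
import Mathlib
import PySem

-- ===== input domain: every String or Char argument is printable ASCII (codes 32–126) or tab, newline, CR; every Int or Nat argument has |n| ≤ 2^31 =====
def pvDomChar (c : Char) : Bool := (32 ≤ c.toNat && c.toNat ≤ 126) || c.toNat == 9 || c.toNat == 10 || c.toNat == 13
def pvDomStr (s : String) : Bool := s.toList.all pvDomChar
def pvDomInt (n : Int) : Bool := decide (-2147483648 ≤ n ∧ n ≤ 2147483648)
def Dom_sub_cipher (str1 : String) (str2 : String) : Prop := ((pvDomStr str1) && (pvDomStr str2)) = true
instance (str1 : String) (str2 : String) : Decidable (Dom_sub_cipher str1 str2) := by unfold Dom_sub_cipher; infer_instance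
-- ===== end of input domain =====

-- B replaces A's incremental dict-building scan by a single cardinality comparison over sets (simpler).

-- ===== PORT A =====
-- the for-loop over range(len(keys)): early `return False` becomes `false`, falling off the loop becomes `true`
def subLoopA : List Char → List Char → PySem.Dict Char Char → Bool
  | [], _, _ => true
  | _, [], _ => true
  | k :: ks, v :: vs, d =>
    match d.get? k with           -- "keys[i] in cipher_dict.keys()" + lookup "cipher_dict[keys[i]]"
    | some w => if w ≠ v then false else subLoopA ks vs d
    | none =>
      if d.values.contains v then false   -- "values[i] in cipher_dict.values()"
      else subLoopA ks vs (d.insert k v)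

def sub_cipher (str1 : String) (str2 : String) : Bool :=
  let keys := str1.toList
  let values := str2.toList
  if keys.length ≠ values.length then false
  else subLoopA keys values PySem.Dict.empty

-- ===== PORT B =====
def sub_cipher_alt (str1 : String) (str2 : String) : Bool :=
  if PySem.Str.len str1 ≠ PySem.Str.len str2 then false
  else
    let pairs := PySem.Set.ofList (str1.toList.zip str2.toList)
    PySem.Set.len pairs == PySem.Set.len (PySem.Set.ofList str1.toList)
      && PySem.Set.len (PySem.Set.ofList str1.toList) == PySem.Set.len (PySem.Set.ofList str2.toList)

-- ===== PRECONDITION & SPEC =====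
def Spec_sub_cipher (str1 : String) (str2 : String) (out : Bool) : Prop := out = sub_cipher_alt str1 str2
instance (str1 : String) (str2 : String) (out : Bool) : Decidable (Spec_sub_cipher str1 str2 out) := by unfold Spec_sub_cipher; infer_instance

-- ===== CLAIM (what is proved, stated in full; the proofs are below) =====
def Claim_equal_sub_cipher : Prop := ∀ (str1 : String) (str2 : String), Dom_sub_cipher str1 str2 → Spec_sub_cipher str1 str2 (sub_cipher str1 str2)

-- ===== LEMMAS AND PROOFS =====

-- p.1 = q.1 ↔ p.2 = q.2 for every pair of pairs: the common characterisation of both programs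
def AllR (Z : List (Char × Char)) : Prop := ∀ p ∈ Z, ∀ q ∈ Z, (p.1 = q.1 ↔ p.2 = q.2)

def GoodD (d : PySem.Dict Char Char) : Prop := d.keys.Nodup ∧ d.values.Nodup

theorem allR_congr {L1 L2 : List (Char × Char)} (h : ∀ x, x ∈ L1 ↔ x ∈ L2) :
    AllR L1 ↔ AllR L2 := by
  constructor <;> intro hA p hp q hq
  · exact hA p ((h p).mpr hp) q ((h q).mpr hq)
  · exact hA p ((h p).mp hp) q ((h q).mp hq)

theorem goodD_allR_items {d : PySem.Dict Char Char} (h : GoodD d) :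
    ∀ p ∈ d.items, ∀ q ∈ d.items, (p.1 = q.1 ↔ p.2 = q.2) := by
  obtain ⟨hk, hv⟩ := h
  have hk' : (d.items.map Prod.fst).Nodup := by
    simpa [PySem.Dict.keys] using hk
  have hv' : (d.items.map Prod.snd).Nodup := by
    simpa [PySem.Dict.values] using hv
  intro p hp q hq
  constructor
  · intro h1
    exact congrArg Prod.snd (List.inj_on_of_nodup_map hk' hp hq h1)
  · intro h2
    exact congrArg Prod.fst (List.inj_on_of_nodup_map hv' hp hq h2)

theorem subLoopA_iff (ks : List Char) : ∀ (vs : List Char) (d : PySem.Dict Char Char),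
    GoodD d → (subLoopA ks vs d = true ↔ AllR (d.items ++ ks.zip vs)) := by
  induction ks with
  | nil =>
    intro vs d hd
    simp only [subLoopA, List.zip_nil_left, List.append_nil, true_iff]
    exact goodD_allR_items hd
  | cons k ks ih =>
    intro vs d hd
    cases vs with
    | nil =>
      simp only [subLoopA, List.zip_nil_right, List.append_nil, true_iff]
      exact goodD_allR_items hd
    | cons v vs =>
      simp only [List.zip_cons_cons]
      cases hget : d.get? k with
      | some w =>
        have hred : subLoopA (k :: ks) (v :: vs) d
            = if w ≠ v then false else subLoopA ks vs d := by
          simp only [subLoopA, hget]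
        rw [hred]
        have hmem : (k, w) ∈ d.items := PySem.Dict.mem_items_of_get?_eq_some d hget
        by_cases hwv : w = v
        · subst hwv
          rw [if_neg (by simp)]
          rw [ih vs d hd]
          apply allR_congr
          intro x
          constructor
          · intro hx
            rcases List.mem_append.mp hx with h | h
            · exact List.mem_append.mpr (Or.inl h)
            · exact List.mem_append.mpr (Or.inr (List.mem_cons.mpr (Or.inr h)))
          · intro hx
            rcases List.mem_append.mp hx with h | h
            · exact List.mem_append.mpr (Or.inl h)
            · rcases List.mem_cons.mp h with h2 | h2
              · exact List.mem_append.mpr (Or.inl (by rw [h2]; exact hmem))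
              · exact List.mem_append.mpr (Or.inr h2)
        · rw [if_pos hwv]
          simp only [Bool.false_eq_true, false_iff]
          intro hA
          exact hwv (by simpa using ((hA (k, w) (List.mem_append.mpr (Or.inl hmem))
            (k, v) (List.mem_append.mpr (Or.inr (List.mem_cons.mpr (Or.inl rfl))))).mp rfl))
      | none =>
        have hnk : k ∉ d.keys := (PySem.Dict.get?_eq_none_iff_not_mem_keys d k).mp hget
        have hnc : d.contains k = false := by
          rw [PySem.Dict.contains_eq_isSome_get?, hget]; rfl
        have hred : subLoopA (k :: ks) (v :: vs) d
            = if d.values.contains v then false else subLoopA ks vs (d.insert k v) := by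
          simp only [subLoopA, hget]
        rw [hred]
        by_cases hv : d.values.contains v = true
        · rw [if_pos hv]
          simp only [Bool.false_eq_true, false_iff]
          have hvmem : v ∈ List.map Prod.snd d.items := by
            have := List.contains_iff_mem.mp hv
            simpa [PySem.Dict.values] using this
          obtain ⟨q, hq, hq2⟩ := List.mem_map.mp hvmem
          intro hA
          have hq1 : q.1 ≠ k := by
            intro h1
            exact hnk (by simpa [PySem.Dict.keys, ← h1] using List.mem_map_of_mem hq (f := Prod.fst))
          exact hq1 ((hA q (List.mem_append.mpr (Or.inl hq))
            (k, v) (List.mem_append.mpr (Or.inr (List.mem_cons.mpr (Or.inl rfl))))).mpr hq2)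
        · rw [if_neg hv]
          have hnv : v ∉ d.values := fun h => hv (List.contains_iff_mem.mpr h)
          have hitems : (d.insert k v).items = d.items ++ [(k, v)] :=
            PySem.Dict.items_insert_of_not_contains d v hnc
          have hgood : GoodD (d.insert k v) := by
            constructor
            · rw [PySem.Dict.keys_insert_of_not_contains d v hnc]
              refine List.Nodup.append hd.1 (List.nodup_singleton k) ?_
              intro a ha hb
              rw [List.mem_singleton] at hb
              exact hnk (hb ▸ ha)
            · have hval : (d.insert k v).values = d.values ++ [v] := by
                simp [PySem.Dict.values, hitems]
              rw [hval]
              refine List.Nodup.append hd.2 (List.nodup_singleton v) ?_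
              intro a ha hb
              rw [List.mem_singleton] at hb
              exact hnv (hb ▸ ha)
          rw [ih vs _ hgood, hitems]
          apply allR_congr
          intro x
          simp only [List.mem_append, List.mem_cons]
          tauto

theorem setLen_eq_card {α : Type} [DecidableEq α] [BEq α] [LawfulBEq α] (xs : List α) :
    (PySem.Set.ofList xs : List α).length = xs.toFinset.card := by
  have h1 : (PySem.Set.ofList xs : List α).toFinset = xs.toFinset := by
    apply Finset.ext
    intro a
    simp [List.mem_toFinset, PySem.Set.mem_ofList]
  rw [← List.toFinset_card_of_nodup (PySem.Set.nodup_ofList xs), h1]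

theorem toFinset_map_eq {α β : Type} [DecidableEq α] [DecidableEq β] (l : List α) (f : α → β) :
    (l.map f).toFinset = l.toFinset.image f := by
  apply Finset.ext
  intro b
  simp [List.mem_toFinset, Finset.mem_image, List.mem_map]

theorem card_proj_iff (Z : List (Char × Char)) (f : Char × Char → Char) :
    (Z.toFinset.card = (Z.map f).toFinset.card ↔
      ∀ p ∈ Z, ∀ q ∈ Z, f p = f q → p = q) := by
  rw [toFinset_map_eq, eq_comm, Finset.card_image_iff]
  constructor
  · intro h p hp q hq hfpq
    exact h (by simpa using hp) (by simpa using hq) hfpq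
  · intro h a ha b hb hfab
    exact h a (by simpa using ha) b (by simpa using hb) hfab

theorem allR_iff_cards (ks vs : List Char) (hlen : ks.length = vs.length) :
    (AllR (ks.zip vs)) ↔
      ((ks.zip vs).toFinset.card = ks.toFinset.card ∧
        ks.toFinset.card = vs.toFinset.card) := by
  have hk : (ks.zip vs).map Prod.fst = ks := List.map_fst_zip (le_of_eq hlen)
  have hv : (ks.zip vs).map Prod.snd = vs := List.map_snd_zip (le_of_eq hlen.symm)
  set Z := ks.zip vs with hZ
  have c1 := card_proj_iff Z Prod.fst
  have c2 := card_proj_iff Z Prod.snd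
  rw [hk] at c1
  rw [hv] at c2
  constructor
  · intro hA
    have hfst : Z.toFinset.card = ks.toFinset.card := by
      rw [c1]
      intro p hp q hq h1
      exact Prod.ext h1 ((hA p hp q hq).mp h1)
    have hsnd : Z.toFinset.card = vs.toFinset.card := by
      rw [c2]
      intro p hp q hq h2
      exact Prod.ext ((hA p hp q hq).mpr h2) h2
    exact ⟨hfst, by omega⟩
  · rintro ⟨h1, h2⟩
    have hfst := c1.mp h1
    have hsnd := c2.mp (by omega)
    intro p hp q hq
    constructor
    · intro he
      exact congrArg Prod.snd (hfst p hp q hq he)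
    · intro he
      exact congrArg Prod.fst (hsnd p hp q hq he)

-- ===== VERDICT (by name: the statement is the Claim_ definition above) =====
theorem sub_cipher_spec : Claim_equal_sub_cipher := by
  unfold Claim_equal_sub_cipher Spec_sub_cipher
  intro s1 s2 _
  unfold sub_cipher sub_cipher_alt
  simp only [PySem.Str.len]
  by_cases hL : s1.length = s2.length
  · have hlen : s1.toList.length = s2.toList.length := by
      rw [String.length_toList, String.length_toList]; exact hL
    rw [if_neg (by simp [hlen]), if_neg (by simp [hL])]
    have hEmpty : GoodD PySem.Dict.empty := by
      constructor <;> simp [PySem.Dict.empty, PySem.Dict.keys, PySem.Dict.values]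
    have hA := subLoopA_iff s1.toList s2.toList PySem.Dict.empty hEmpty
    have hItems : (PySem.Dict.empty : PySem.Dict Char Char).items = [] := rfl
    rw [hItems, List.nil_append] at hA
    rw [Bool.eq_iff_iff, hA, allR_iff_cards _ _ hlen]
    simp only [Bool.and_eq_true, beq_iff_eq, PySem.Set.len, setLen_eq_card]
    constructor
    · rintro ⟨h1, h2⟩
      exact ⟨by exact_mod_cast h1, by exact_mod_cast h2⟩
    · rintro ⟨h1, h2⟩
      exact ⟨by exact_mod_cast h1, by exact_mod_cast h2⟩
  · have hlen : ¬ s1.toList.length = s2.toList.length := by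
      rw [String.length_toList, String.length_toList]; exact hL
    rw [if_pos (by exact hlen), if_pos (by simp [hL])]
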